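-- pv_equiv track=rewrite | github.com/paiml/depyler | examples/marco_polo_cli/marco_polo_simple.py | play_simple_round
-- ===== SOURCE A (Python) =====
-- def play_simple_round(target: int, max_attempts: int) -> int:
--     """Simulate a round with fixed guesses."""
--     attempts = 0
--     guess = 50  # Start with middle guess
--
--     while attempts < max_attempts:
--         attempts = attempts + 1
--
--         if guess == target:
--             return attempts
--         elif guess < target:
--             guess = guess + 10
--         else:
--             guess = guess - 5
--
--     return attempts
-- ===== SOURCE B (Python) =====
-- def play_simple_round(target: int, max_attempts: int) -> int:
--     """Closed form: the guess walk from 50 (+10 below target, -5 above) hits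
--     target at a computable attempt, or never (target not a multiple of 5)."""
--     if target == 50:
--         hit = 1
--     elif target > 50:
--         if target % 10 == 0:
--             hit = (target - 50) // 10 + 1
--         elif target % 5 == 0:
--             hit = (target - 45) // 10 + 2
--         else:
--             hit = None
--     elif target % 5 == 0:
--         hit = (50 - target) // 5 + 1
--     else:
--         hit = None
--     if hit is not None and hit <= max_attempts:
--         return hit
--     return max(max_attempts, 0)
-- ===== Notes on version B (the rewrite author's own statement) =====
-- stated objective: faster
-- what changed: Replaced the per-attempt simulation loop by a closed-form computation of the attempt at which the deterministic guess walk from 50 hits the target (or never, when the target is not a multiple of 5), clipped by max_attempts.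
import Mathlib
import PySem

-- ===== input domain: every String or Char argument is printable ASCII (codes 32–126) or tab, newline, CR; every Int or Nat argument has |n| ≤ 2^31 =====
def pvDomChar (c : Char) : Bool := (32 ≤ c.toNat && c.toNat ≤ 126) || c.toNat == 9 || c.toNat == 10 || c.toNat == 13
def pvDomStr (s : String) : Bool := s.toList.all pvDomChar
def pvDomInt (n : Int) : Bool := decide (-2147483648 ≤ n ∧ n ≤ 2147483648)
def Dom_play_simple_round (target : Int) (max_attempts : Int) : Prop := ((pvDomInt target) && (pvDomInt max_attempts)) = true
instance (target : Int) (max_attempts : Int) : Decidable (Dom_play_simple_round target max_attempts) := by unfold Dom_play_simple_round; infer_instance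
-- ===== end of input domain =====

-- B replaces A's per-attempt simulation loop by an O(1) closed form of the hit time; faster (asymptotic).

-- ===== PORT A =====
-- the while loop; fuel = number of remaining iterations allowed by `attempts < max_attempts`
def playAux (target : Int) (fuel : Nat) (attempts : Int) (guess : Int) : Int :=
  match fuel with
  | 0 => attempts
  | Nat.succ n =>
    let attempts := attempts + 1
    if guess = target then attempts
    else if guess < target then playAux target n attempts (guess + 10)
    else playAux target n attempts (guess - 5)

def play_simple_round (target : Int) (max_attempts : Int) : Int :=
  playAux target max_attempts.toNat 0 50

-- ===== PORT B =====
-- Source B: `hit` is None or the closed-form hit attempt; return hit when it exists and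
-- hit <= max_attempts, else max(max_attempts, 0)
def play_simple_round_alt (target : Int) (max_attempts : Int) : Int :=
  let hit : Option Int :=
    if target = 50 then some 1
    else if target > 50 then
      if PySem.Int.mod target 10 = 0 then some (PySem.Int.floordiv (target - 50) 10 + 1)
      else if PySem.Int.mod target 5 = 0 then some (PySem.Int.floordiv (target - 45) 10 + 2)
      else none
    else if PySem.Int.mod target 5 = 0 then some (PySem.Int.floordiv (50 - target) 5 + 1)
    else none
  hit.elim (max max_attempts 0) (fun h => if h ≤ max_attempts then h else max max_attempts 0)

-- ===== PRECONDITION & SPEC =====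
def Spec_play_simple_round (target : Int) (max_attempts : Int) (out : Int) : Prop := out = play_simple_round_alt target max_attempts
instance (target : Int) (max_attempts : Int) (out : Int) : Decidable (Spec_play_simple_round target max_attempts out) := by unfold Spec_play_simple_round; infer_instance

-- ===== CLAIM (what is proved, stated in full; the proofs are below) =====
def Claim_equal_play_simple_round : Prop := ∀ (target : Int) (max_attempts : Int), Dom_play_simple_round target max_attempts → Spec_play_simple_round target max_attempts (play_simple_round target max_attempts)

-- ===== LEMMAS AND PROOFS =====

-- hit time of the walk from guess g (1-based attempt count), meaningful when 5 ∣ g and 5 ∣ target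
def hitTime (target : Int) (g : Int) : Int :=
  if g = target then 1
  else if g < target then
    if (target - g) % 10 = 0 then (target - g) / 10 + 1 else (target - g + 5) / 10 + 2
  else (g - target) / 5 + 1

lemma hitTime_pos (target g : Int) (h5t : (5:Int) ∣ target) (h5g : (5:Int) ∣ g) :
    1 ≤ hitTime target g := by
  unfold hitTime; split_ifs <;> omega

lemma hitTime_rec_lt (target g : Int) (h5t : (5:Int) ∣ target) (h5g : (5:Int) ∣ g)
    (hlt : g < target) : hitTime target g = hitTime target (g + 10) + 1 := by
  unfold hitTime; split_ifs <;> omega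

lemma hitTime_rec_gt (target g : Int) (h5t : (5:Int) ∣ target) (h5g : (5:Int) ∣ g)
    (hgt : target < g) : hitTime target g = hitTime target (g - 5) + 1 := by
  unfold hitTime; split_ifs <;> omega

-- when 5 ∤ target the walk from a multiple of 5 never hits
lemma playAux_never (target : Int) (h5t : ¬ (5:Int) ∣ target) :
    ∀ (n : Nat) (a g : Int), (5:Int) ∣ g → playAux target n a g = a + n := by
  intro n
  induction n with
  | zero => intro a g _; simp [playAux]
  | succ n ih =>
    intro a g h5g
    have hne : g ≠ target := by rintro rfl; exact h5t h5g
    by_cases hlt : g < target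
    · simp only [playAux, hne, hlt, if_true, if_false]
      rw [ih (a + 1) (g + 10) (by omega)]; omega
    · simp only [playAux, hne, hlt, if_false]
      rw [ih (a + 1) (g - 5) (by omega)]; omega

-- when 5 ∣ target the walk hits at attempt hitTime, capped by the remaining fuel
lemma playAux_hit (target : Int) (h5t : (5:Int) ∣ target) :
    ∀ (n : Nat) (a g : Int), (5:Int) ∣ g →
      playAux target n a g =
        if hitTime target g ≤ (n : Int) then a + hitTime target g else a + n := by
  intro n
  induction n with
  | zero =>
    intro a g h5g
    have := hitTime_pos target g h5t h5g
    simp [playAux]; omega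
  | succ n ih =>
    intro a g h5g
    by_cases heq : g = target
    · subst heq
      have h1 : hitTime g g = 1 := by unfold hitTime; simp
      simp [playAux, h1]
    · by_cases hlt : g < target
      · have h5g' : (5:Int) ∣ (g + 10) := by omega
        have hrec := hitTime_rec_lt target g h5t h5g hlt
        have hp := hitTime_pos target (g + 10) h5t h5g'
        simp only [playAux, heq, hlt, if_true, if_false]
        rw [ih (a + 1) (g + 10) h5g', hrec]
        split_ifs <;> omega
      · have hgt : target < g := by omega
        have h5g' : (5:Int) ∣ (g - 5) := by omega
        have hrec := hitTime_rec_gt target g h5t h5g hgt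
        have hp := hitTime_pos target (g - 5) h5t h5g'
        simp only [playAux, heq, hlt, if_false]
        rw [ih (a + 1) (g - 5) h5g', hrec]
        split_ifs <;> omega

-- ===== VERDICT (by name: the statement is the Claim_ definition above) =====
theorem play_simple_round_spec : Claim_equal_play_simple_round := by
  intro target m _
  unfold Spec_play_simple_round play_simple_round play_simple_round_alt
  have hmod10 : PySem.Int.mod target 10 = target % 10 :=
    PySem.Int.mod_eq_emod_of_pos (by norm_num)
  have hmod5 : PySem.Int.mod target 5 = target % 5 :=
    PySem.Int.mod_eq_emod_of_pos (by norm_num)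
  by_cases h5t : (5:Int) ∣ target
  · rw [playAux_hit target h5t m.toNat 0 50 (by norm_num)]
    have hp := hitTime_pos target 50 h5t (by norm_num)
    by_cases heq : target = 50
    · subst heq
      have h1 : hitTime 50 50 = 1 := by unfold hitTime; simp
      simp [h1]
    · by_cases hgt : target > 50
      · by_cases h10 : target % 10 = 0
        · have hv : hitTime target 50 = PySem.Int.floordiv (target - 50) 10 + 1 := by
            rw [PySem.Int.floordiv_eq_ediv_of_pos (by norm_num)]
            unfold hitTime
            rw [if_neg (by omega), if_pos (by omega), if_pos (by omega)]
          have hfd : PySem.Int.floordiv (target - 50) 10 = (target - 50) / 10 :=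
            PySem.Int.floordiv_eq_ediv_of_pos (by norm_num)
          simp [heq, hgt, h10, ← hv]
          split_ifs <;> omega
        · have h5 : target % 5 = 0 := by omega
          have hv : hitTime target 50 = PySem.Int.floordiv (target - 45) 10 + 2 := by
            rw [PySem.Int.floordiv_eq_ediv_of_pos (by norm_num)]
            unfold hitTime
            rw [if_neg (by omega), if_pos (by omega), if_neg (by omega)]
            omega
          have hfd : PySem.Int.floordiv (target - 45) 10 = (target - 45) / 10 :=
            PySem.Int.floordiv_eq_ediv_of_pos (by norm_num)
          simp [heq, hgt, hmod10, h10, h5, ← hv]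
          split_ifs <;> omega
      · have h5 : target % 5 = 0 := by omega
        have hv : hitTime target 50 = PySem.Int.floordiv (50 - target) 5 + 1 := by
          rw [PySem.Int.floordiv_eq_ediv_of_pos (by norm_num)]
          unfold hitTime
          rw [if_neg (by omega), if_neg (by omega)]
        have hfd : PySem.Int.floordiv (50 - target) 5 = (50 - target) / 5 :=
          PySem.Int.floordiv_eq_ediv_of_pos (by norm_num)
        simp [heq, hgt, h5, ← hv]
        split_ifs <;> omega
  · rw [playAux_never target h5t m.toNat 0 50 (by norm_num)]
    have hne : target ≠ 50 := by rintro rfl; exact h5t (by norm_num)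
    have h10 : target % 10 ≠ 0 := by omega
    have h5 : target % 5 ≠ 0 := by omega
    simp [hne, h10, h5]
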